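-- pv_equiv track=rewrite | github.com/Motsu-san/scripts_for_autoware | py/compare_localization_diff.py | find_continuous_intervals
-- ===== SOURCE A (Python) =====
-- from typing import List, Tuple
--
-- def find_continuous_intervals(timestamps: List[int], max_gap_ns: int = 180000000) -> List[Tuple[int, int]]:
--     """
--     タイムスタンプのリストから連続区間を検出
--
--     Args:
--         timestamps: タイムスタンプのリスト（nanoseconds）
--         max_gap_ns: 連続とみなす最大の間隔（nanoseconds、デフォルト: 180ms）
--
--     Returns:
--         [(start_timestamp_ns, end_timestamp_ns), ...] のリスト
--     """
--     if len(timestamps) == 0: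
--         return []
--
--     intervals = []
--     sorted_timestamps = sorted(timestamps)
--
--     start_ts = sorted_timestamps[0]
--     prev_ts = sorted_timestamps[0]
--
--     for ts in sorted_timestamps[1:]:
--         gap = ts - prev_ts
--         if gap > max_gap_ns:
--             # 不連続を検出
--             intervals.append((start_ts, prev_ts))
--             start_ts = ts
--         prev_ts = ts
--
--     # 最後の区間を追加
--     intervals.append((start_ts, sorted_timestamps[-1]))
--
--     return intervals
-- ===== SOURCE B (Python) =====
-- def find_continuous_intervals(timestamps, max_gap_ns=180000000):
--     if len(timestamps) == 0:
--         return []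
--     s = sorted(timestamps)
--     n = len(s)
--     # phase 1: positions where a gap breaks continuity
--     splits = [i for i in range(1, n) if s[i] - s[i - 1] > max_gap_ns]
--     # phase 2: slice the sorted list at those boundaries
--     bounds = [0] + splits + [n]
--     return [(s[b], s[e - 1]) for b, e in zip(bounds, bounds[1:])]
-- ===== Notes on version B (the rewrite author's own statement) =====
-- stated objective: alternative
-- what changed: Replaces A's single-pass start/prev accumulator loop with a two-phase structure: first compute the list of split indices (where the sorted gap exceeds max_gap_ns), then partition via the boundary list [0]+splits+[n] and read the interval endpoints directly off the sorted list.
import Mathlib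
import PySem

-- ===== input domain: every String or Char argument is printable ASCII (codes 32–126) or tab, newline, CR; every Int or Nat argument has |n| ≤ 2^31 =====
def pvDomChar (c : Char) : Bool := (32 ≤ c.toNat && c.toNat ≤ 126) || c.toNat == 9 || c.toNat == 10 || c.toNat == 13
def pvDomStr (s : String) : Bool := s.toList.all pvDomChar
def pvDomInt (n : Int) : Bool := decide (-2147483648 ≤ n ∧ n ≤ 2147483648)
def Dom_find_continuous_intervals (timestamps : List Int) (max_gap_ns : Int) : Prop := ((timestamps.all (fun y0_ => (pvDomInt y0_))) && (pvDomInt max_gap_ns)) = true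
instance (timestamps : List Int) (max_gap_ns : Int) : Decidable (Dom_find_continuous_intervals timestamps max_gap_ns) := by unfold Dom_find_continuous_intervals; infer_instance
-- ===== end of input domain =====

-- B replaces A's start/prev accumulator loop by a two-phase boundary computation
-- (split indices first, then interval endpoints read off the sorted list); same cost, different structure.

-- ===== PORT A =====
def find_continuous_intervals (timestamps : List Int) (max_gap_ns : Int) : List (Int × Int) :=
  if timestamps.length = 0 then [] else
  let sorted_timestamps := PySem.List.sorted timestamps (fun x => x) false
  let start_ts := PySem.List.pyGetD sorted_timestamps 0 0
  let prev_ts := PySem.List.pyGetD sorted_timestamps 0 0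
  let st := (PySem.List.slice sorted_timestamps (some 1) none).foldl
    (fun (st : List (Int × Int) × Int × Int) ts =>
      if ts - st.2.2 > max_gap_ns then (st.1 ++ [(st.2.1, st.2.2)], ts, ts)
      else (st.1, st.2.1, ts))
    ([], start_ts, prev_ts)
  st.1 ++ [(st.2.1, PySem.List.pyGetD sorted_timestamps (-1) 0)]

-- ===== PORT B =====
def find_continuous_intervals_alt (timestamps : List Int) (max_gap_ns : Int) : List (Int × Int) :=
  if timestamps.length = 0 then [] else
  let s := PySem.List.sorted timestamps (fun x => x) false
  let n : Int := s.length
  let splits := (PySem.List.pyRange 1 n 1).filter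
    (fun i => decide (PySem.List.pyGetD s i 0 - PySem.List.pyGetD s (i - 1) 0 > max_gap_ns))
  let bounds := [(0 : Int)] ++ splits ++ [n]
  (bounds.zip bounds.tail).map
    (fun be => (PySem.List.pyGetD s be.1 0, PySem.List.pyGetD s (be.2 - 1) 0))

-- ===== PRECONDITION & SPEC =====
def Spec_find_continuous_intervals (timestamps : List Int) (max_gap_ns : Int) (out : List (Int × Int)) : Prop := out = find_continuous_intervals_alt timestamps max_gap_ns
instance (timestamps : List Int) (max_gap_ns : Int) (out : List (Int × Int)) : Decidable (Spec_find_continuous_intervals timestamps max_gap_ns out) := by unfold Spec_find_continuous_intervals; infer_instance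

-- ===== CLAIM (what is proved, stated in full; the proofs are below) =====
def Claim_equal_find_continuous_intervals : Prop := ∀ (timestamps : List Int) (max_gap_ns : Int), Dom_find_continuous_intervals timestamps max_gap_ns → Spec_find_continuous_intervals timestamps max_gap_ns (find_continuous_intervals timestamps max_gap_ns)

-- ===== LEMMAS AND PROOFS =====

-- reference function: group a tail `l` given the current interval start and previous value
def pvGrp (g : Int) : Int → Int → List Int → List (Int × Int)
  | start, prev, [] => [(start, prev)]
  | start, prev, t :: ts =>
    if t - prev > g then (start, prev) :: pvGrp g t t ts else pvGrp g start t ts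

-- A's loop body, named for the proofs (identical to the lambda in the port)
def pvStep (g : Int) (st : List (Int × Int) × Int × Int) (ts : Int) : List (Int × Int) × Int × Int :=
  if ts - st.2.2 > g then (st.1 ++ [(st.2.1, st.2.2)], ts, ts) else (st.1, st.2.1, ts)

-- B's two phases, named for the proofs
def pvSplits (g : Int) (s : List Int) (m : Int) : List Int :=
  (PySem.List.pyRange m (s.length : Int) 1).filter
    (fun i => decide (PySem.List.pyGetD s i 0 - PySem.List.pyGetD s (i - 1) 0 > g))

def pvPairs (s : List Int) (l : List Int) : List (Int × Int) :=
  (l.zip l.tail).map (fun be => (PySem.List.pyGetD s be.1 0, PySem.List.pyGetD s (be.2 - 1) 0))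

lemma pvPairs_cons (s : List Int) (a c : Int) (r : List Int) :
    pvPairs s (a :: c :: r) = (PySem.List.pyGetD s a 0, PySem.List.pyGetD s (c - 1) 0) :: pvPairs s (c :: r) := rfl

lemma pvGetD_of_drop (s : List Int) (k : Nat) (x : Int) (rest : List Int)
    (h : s.drop k = x :: rest) : PySem.List.pyGetD s (k : Int) 0 = x := by
  have hx : s[k]? = some x := by
    have h0 := List.getElem?_drop (xs := s) (i := k) (j := 0)
    rw [h] at h0
    simpa using h0.symm
  simp [PySem.List.pyGetD_natCast, List.getD_eq_getElem?_getD, hx]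

lemma pvLast_cons : ∀ (rest : List Int) (x : Int) (h : (x :: rest : List Int) ≠ []),
    (x :: rest).getLast h = rest.getLastD x
  | [], _, _ => rfl
  | y :: t, x, _ => by
    rw [List.getLast_cons (by simp), List.getLastD_cons]
    exact pvLast_cons t y (by simp)

lemma pvFoldPrev (g : Int) (l : List Int) :
    ∀ (acc : List (Int × Int)) (start prev : Int),
    (l.foldl (pvStep g) (acc, start, prev)).2.2 = l.getLastD prev := by
  induction l with
  | nil => intro acc start prev; rfl
  | cons t ts ih =>
    intro acc start prev
    rw [List.foldl_cons, List.getLastD_cons]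
    by_cases hgap : t - prev > g
    · rw [show pvStep g (acc, start, prev) t = (acc ++ [(start, prev)], t, t) by simp [pvStep, hgap]]
      exact ih _ t t
    · rw [show pvStep g (acc, start, prev) t = (acc, start, t) by simp [pvStep, hgap]]
      exact ih _ start t

lemma pvLoopA (g : Int) (l : List Int) :
    ∀ (acc : List (Int × Int)) (start prev : Int),
    (l.foldl (pvStep g) (acc, start, prev)).1
      ++ [((l.foldl (pvStep g) (acc, start, prev)).2.1, l.getLastD prev)]
    = acc ++ pvGrp g start prev l := by
  induction l with
  | nil => intro acc start prev; simp [pvGrp]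
  | cons t ts ih =>
    intro acc start prev
    rw [List.foldl_cons, List.getLastD_cons]
    by_cases hgap : t - prev > g
    · rw [show pvStep g (acc, start, prev) t = (acc ++ [(start, prev)], t, t) by simp [pvStep, hgap]]
      rw [ih]
      simp [pvGrp, hgap]
    · rw [show pvStep g (acc, start, prev) t = (acc, start, t) by simp [pvStep, hgap]]
      rw [ih]
      simp [pvGrp, hgap]

-- B's boundary computation started at position k, with current interval start index b,
-- equals pvGrp on the remaining tail of the sorted list.
lemma pvKeyB (g : Int) (s : List Int) :
    ∀ (rest : List Int) (k b : Nat) (x : Int), s.drop k = x :: rest → b ≤ k →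
    pvPairs s ([(b : Int)] ++ pvSplits g s ((k : Int) + 1) ++ [(s.length : Int)])
      = pvGrp g (PySem.List.pyGetD s (b : Int) 0) x rest := by
  intro rest
  induction rest with
  | nil =>
    intro k b x hdrop hb
    have hlen : s.length = k + 1 := by
      have := congrArg List.length hdrop
      simp [List.length_drop] at this
      omega
    have hnil : pvSplits g s ((k : Int) + 1) = [] := by
      unfold pvSplits
      rw [PySem.List.pyRange_one_eq_nil (by omega)]
      rfl
    have hk : PySem.List.pyGetD s ((s.length : Int) - 1) 0 = x := by
      have h1 : ((s.length : Int) - 1) = ((k : Nat) : Int) := by rw [hlen]; push_cast; ring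
      rw [h1]; exact pvGetD_of_drop s k x [] hdrop
    rw [hnil]
    simp only [List.append_nil, List.nil_append, List.cons_append]
    rw [pvPairs_cons, hk]
    rfl
  | cons y t ih =>
    intro k b x hdrop hb
    have hdrop' : s.drop (k + 1) = y :: t := by
      rw [← List.tail_drop, hdrop]; rfl
    have hlen : (k : Int) + 1 < (s.length : Int) := by
      have := congrArg List.length hdrop'
      simp [List.length_drop] at this
      omega
    have hx : PySem.List.pyGetD s (k : Int) 0 = x := pvGetD_of_drop s k x (y :: t) hdrop
    have hy : PySem.List.pyGetD s ((k : Int) + 1) 0 = y := by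
      have := pvGetD_of_drop s (k + 1) y t hdrop'
      push_cast at this; exact this
    have hsplit : pvSplits g s ((k : Int) + 1)
        = (if y - x > g then [(k : Int) + 1] else []) ++ pvSplits g s ((k : Int) + 1 + 1) := by
      unfold pvSplits
      rw [PySem.List.pyRange_one_cons hlen, List.filter_cons]
      have h1 : ((k : Int) + 1 - 1) = (k : Int) := by ring
      rw [h1, hx, hy]
      by_cases hgap : y - x > g
      · rw [if_pos (by simpa using hgap), if_pos hgap]; rfl
      · rw [if_neg (by simpa using hgap), if_neg hgap]; rfl
    by_cases hgap : y - x > g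
    · rw [hsplit, if_pos hgap]
      have ihr := ih (k + 1) (k + 1) y hdrop' (le_refl _)
      push_cast at ihr
      simp only [List.cons_append, List.nil_append] at ihr ⊢
      rw [pvPairs_cons]
      rw [ihr, hy]
      have h1 : ((k : Int) + 1 - 1) = (k : Int) := by ring
      rw [h1, hx]
      simp [pvGrp, hgap]
    · rw [hsplit, if_neg hgap]
      have ihr := ih (k + 1) b y hdrop' (by omega)
      push_cast at ihr
      simp only [List.cons_append, List.nil_append] at ihr ⊢
      rw [ihr]
      simp [pvGrp, hgap]

-- ===== VERDICT (by name: the statement is the Claim_ definition above) =====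
theorem find_continuous_intervals_spec : Claim_equal_find_continuous_intervals := by
  intro timestamps max_gap_ns _
  unfold Spec_find_continuous_intervals find_continuous_intervals find_continuous_intervals_alt
  by_cases hemp : timestamps.length = 0
  · simp [hemp]
  · simp only [if_neg hemp]
    set s := PySem.List.sorted timestamps (fun x => x) false with hs
    have hslen : s.length = timestamps.length := PySem.List.length_sorted timestamps (fun x => x) false
    have hsne : s ≠ [] := by
      intro h; rw [h] at hslen; simp at hslen; omega
    obtain ⟨x, rest, hxr⟩ := List.exists_cons_of_ne_nil hsne
    have hslice : PySem.List.slice s (some 1) none = rest := by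
      rw [PySem.List.slice_from_one, hxr]; rfl
    have hlast : PySem.List.pyGetD s (-1) 0 = rest.getLastD x := by
      rw [hxr, PySem.List.pyGetD_neg_one (xs := x :: rest) (d := (0 : Int)) (by simp)]
      exact pvLast_cons rest x (by simp)
    have hget0 : PySem.List.pyGetD s 0 0 = x := by
      rw [hxr]; exact PySem.List.pyGetD_zero_cons x rest 0
    have hB := pvKeyB max_gap_ns s rest 0 0 x (by simpa using hxr) (le_refl _)
    simp only [Nat.cast_zero, zero_add] at hB
    unfold pvSplits pvPairs at hB
    rw [hget0] at hB
    have hA := pvLoopA max_gap_ns rest [] x x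
    rw [List.nil_append] at hA
    have hprev := pvFoldPrev max_gap_ns rest [] x x
    simp only [hslice, hget0, hlast]
    show (rest.foldl (pvStep max_gap_ns) ([], x, x)).1
        ++ [((rest.foldl (pvStep max_gap_ns) ([], x, x)).2.1, rest.getLastD x)] = _
    rw [hA, ← hB]
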